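-- pv_equiv track=rewrite | github.com/Pragith-C/Python | elevation.py | compare_elevations_within_row
-- ===== SOURCE A (Python) =====
-- from typing import List
--
-- def compare_elevations_within_row(elevation_map: List[List[int]], map_row: int,
--                                   level: int) -> List[int]:
--     """Return a new list containing the three counts: the number of
--     elevations from row number map_row of elevation map elevation_map
--     that are less than, equal to, and greater than elevation level.
--
--     Precondition: elevation_map is a valid elevation map.
--                   0 <= map_row < len(elevation_map).
--
--     >>> compare_elevations_within_row(THREE_BY_THREE, 1, 5)
--     [1, 1, 1]
--     >>> compare_elevations_within_row(FOUR_BY_FOUR, 1, 2)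
--     [0, 1, 3]
--
--     """
--     less_level = 0
--     equal_level = 0
--     more_level = 0
--     for i in range(len(elevation_map[map_row])):
--         if elevation_map[map_row][i] < level:
--             less_level += 1
--         elif elevation_map[map_row][i] == level:
--             equal_level += 1
--         elif elevation_map[map_row][i] > level:
--             more_level += 1
--     new_elevation_map = [less_level, equal_level, more_level]
--     return new_elevation_map
-- ===== SOURCE B (Python) =====
-- from typing import List
--
-- def _search(row: List[int], level: int, strict: bool) -> int:
--     """First index i in sorted row with row[i] >= level (strict) / row[i] > level (not strict)."""
--     lo, hi = 0, len(row)
--     while lo < hi: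
--         mid = (lo + hi) // 2
--         if (row[mid] < level) if strict else (row[mid] <= level):
--             lo = mid + 1
--         else:
--             hi = mid
--     return lo
--
-- def compare_elevations_within_row(elevation_map: List[List[int]], map_row: int,
--                                   level: int) -> List[int]:
--     row = sorted(elevation_map[map_row])
--     lo = _search(row, level, True)
--     hi = _search(row, level, False)
--     return [lo, hi - lo, len(row) - hi]
-- ===== Notes on version B (the rewrite author's own statement) =====
-- stated objective: alternative
-- what changed: B sorts the row and locates level's lower/upper boundary positions with two hand-written binary searches, reading all three counts off the split indices (lo, hi-lo, len-hi) instead of scanning the row with three comparison counters.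
import Mathlib
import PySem

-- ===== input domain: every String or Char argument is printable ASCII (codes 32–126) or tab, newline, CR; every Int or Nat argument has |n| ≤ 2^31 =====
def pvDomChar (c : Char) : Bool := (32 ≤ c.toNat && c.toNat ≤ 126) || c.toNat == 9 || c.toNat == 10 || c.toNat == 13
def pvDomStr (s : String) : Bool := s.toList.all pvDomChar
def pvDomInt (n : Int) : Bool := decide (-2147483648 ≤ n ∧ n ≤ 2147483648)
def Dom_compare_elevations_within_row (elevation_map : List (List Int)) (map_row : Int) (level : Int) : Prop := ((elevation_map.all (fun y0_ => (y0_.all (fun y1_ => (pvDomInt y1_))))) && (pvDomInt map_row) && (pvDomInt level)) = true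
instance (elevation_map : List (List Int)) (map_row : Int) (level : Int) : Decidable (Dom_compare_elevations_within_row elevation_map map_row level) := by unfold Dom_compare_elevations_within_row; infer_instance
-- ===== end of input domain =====

-- B sorts the row and reads the three counts off two binary-search split points
-- instead of scanning with three counters; equivalence of return values only.

-- ===== PORT A =====
-- literal port of A: three counters, an indexed loop over range(len(elevation_map[map_row]))
def compare_elevations_within_row (elevation_map : List (List Int)) (map_row : Int) (level : Int) : List Int :=
  let row := PySem.List.pyGetD elevation_map map_row ([] : List Int)
  let s := (PySem.List.pyRange 0 (row.length : Int) 1).foldl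
    (fun (s : Int × Int × Int) i =>
      let v := PySem.List.pyGetD row i 0
      if v < level then (s.1 + 1, s.2.1, s.2.2)
      else if v = level then (s.1, s.2.1 + 1, s.2.2)
      else if v > level then (s.1, s.2.1, s.2.2 + 1)
      else s) (0, 0, 0)
  [s.1, s.2.1, s.2.2]

-- ===== PORT B =====
-- the while-loop of B's _search helper; `row[mid]` is in range whenever lo < hi ≤ len row,
-- so getD is exact there
def cewrSearchLoop (row : List Int) (level : Int) (strict : Bool) : Nat → Nat → Nat → Nat
  | 0, lo, _hi => lo
  | fuel + 1, lo, hi =>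
    if lo < hi then
      let mid := (lo + hi) / 2
      if (if strict then row.getD mid 0 < level else row.getD mid 0 ≤ level) then
        cewrSearchLoop row level strict fuel (mid + 1) hi
      else
        cewrSearchLoop row level strict fuel lo mid
    else lo

def cewrSearch (row : List Int) (level : Int) (strict : Bool) : Nat :=
  cewrSearchLoop row level strict row.length 0 row.length

def compare_elevations_within_row_alt (elevation_map : List (List Int)) (map_row : Int) (level : Int) : List Int :=
  let row := PySem.List.sorted (PySem.List.pyGetD elevation_map map_row ([] : List Int)) (fun v => v) false
  let lo := cewrSearch row level true
  let hi := cewrSearch row level false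
  [(lo : Int), (hi : Int) - (lo : Int), (row.length : Int) - (hi : Int)]

-- ===== PRECONDITION & SPEC =====
-- Pre_ excludes exactly the inputs where elevation_map[map_row] raises IndexError
-- (negative map_row indexes from the end in Python and is admitted).
def Pre_compare_elevations_within_row (elevation_map : List (List Int)) (map_row : Int) (level : Int) : Prop :=
  PySem.Raise.InRange elevation_map.length map_row
instance (elevation_map : List (List Int)) (map_row : Int) (level : Int) : Decidable (Pre_compare_elevations_within_row elevation_map map_row level) := by unfold Pre_compare_elevations_within_row; infer_instance

def pvWitness_compare_elevations_within_row : List (List Int) × Int × Int := ([[1, 5, 9], [2, 5, 7]], 1, 5)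

def Spec_compare_elevations_within_row (elevation_map : List (List Int)) (map_row : Int) (level : Int) (out : List Int) : Prop := out = compare_elevations_within_row_alt elevation_map map_row level
instance (elevation_map : List (List Int)) (map_row : Int) (level : Int) (out : List Int) : Decidable (Spec_compare_elevations_within_row elevation_map map_row level out) := by unfold Spec_compare_elevations_within_row; infer_instance

-- ===== CLAIM (what is proved, stated in full; the proofs are below) =====
def Claim_equal_compare_elevations_within_row : Prop := ∀ (elevation_map : List (List Int)) (map_row : Int) (level : Int), Dom_compare_elevations_within_row elevation_map map_row level → Pre_compare_elevations_within_row elevation_map map_row level → Spec_compare_elevations_within_row elevation_map map_row level (compare_elevations_within_row elevation_map map_row level)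

-- ===== LEMMAS AND PROOFS =====

-- A's loop over a row, started at any accumulator, adds the three counts.
theorem cewr_fold_counts (level : Int) (row : List Int) (l e g : Int) :
    row.foldl (fun (s : Int × Int × Int) (v : Int) =>
      if v < level then (s.1 + 1, s.2.1, s.2.2)
      else if v = level then (s.1, s.2.1 + 1, s.2.2)
      else if v > level then (s.1, s.2.1, s.2.2 + 1)
      else s) (l, e, g)
    = (l + (row.countP (fun v => decide (v < level)) : Int),
       e + (row.countP (fun v => decide (v = level)) : Int),
       g + (row.countP (fun v => decide (level < v)) : Int)) := by
  induction row generalizing l e g with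
  | nil => simp
  | cons v rest ih =>
    simp only [List.foldl_cons, List.countP_cons]
    rcases lt_trichotomy v level with h | h | h
    · rw [if_pos h, ih]
      have h1 : ¬ v = level := ne_of_lt h
      have h2 : ¬ level < v := not_lt.mpr (le_of_lt h)
      simp [h, h1, h2]; omega
    · rw [if_neg (by omega), if_pos h, ih]
      simp [h]; omega
    · rw [if_neg (by omega), if_neg (by omega), if_pos h, ih]
      have h1 : ¬ v < level := not_lt.mpr (le_of_lt h)
      have h2 : ¬ v = level := (ne_of_lt h).symm
      simp [h, h1, h2]; omega

-- a countP is determined by a split point of all-true then all-false positions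
theorem cewr_countP_split (p : Int → Bool) :
    ∀ (a : List Int) (k : Nat), k ≤ a.length →
      (∀ i, i < k → p (a.getD i 0) = true) →
      (∀ i, k ≤ i → i < a.length → p (a.getD i 0) = false) →
      a.countP p = k := by
  intro a
  induction a with
  | nil => intro k hk _ _; simp at hk ⊢; omega
  | cons v t ih =>
    intro k hk htrue hfalse
    cases k with
    | zero =>
      have hv : p v = false := hfalse 0 (Nat.zero_le _) (by simp)
      have ht : t.countP p = 0 := ih 0 (Nat.zero_le _) (by omega)
        (fun i _ hi => hfalse (i + 1) (by omega) (by simpa using Nat.succ_lt_succ hi))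
      simp [hv, ht]
    | succ k' =>
      have hv : p v = true := htrue 0 (by omega)
      have ht : t.countP p = k' := ih k' (by simpa using hk)
        (fun i hi => htrue (i + 1) (by omega))
        (fun i h1 h2 => hfalse (i + 1) (by omega) (by simpa using Nat.succ_lt_succ h2))
      simp [hv, ht]

-- on a weakly increasing row, the binary-search loop lands on the split point of p,
-- where p is the loop's branch predicate
theorem cewrSearchLoop_spec (row : List Int) (level : Int) (strict : Bool)
    (p : Int → Bool)
    (hp : ∀ v, p v = (if strict then decide (v < level) else decide (v ≤ level)))
    (hmono : ∀ i j, i ≤ j → j < row.length →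
      p (row.getD j 0) = true → p (row.getD i 0) = true) :
    ∀ (fuel lo hi : Nat), hi - lo ≤ fuel → lo ≤ hi → hi ≤ row.length →
      (∀ i, i < lo → p (row.getD i 0) = true) →
      (∀ i, hi ≤ i → i < row.length → p (row.getD i 0) = false) →
      cewrSearchLoop row level strict fuel lo hi = row.countP p := by
  intro fuel
  induction fuel with
  | zero =>
    intro lo hi hfuel hlohi hhi htrue hfalse
    have hlh2 : lo = hi := by omega
    exact (cewr_countP_split p row lo (by omega) htrue
      (fun i h1 h2 => hfalse i (by omega) h2)).symm
  | succ fuel ih =>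
    intro lo hi hfuel hlohi hhi htrue hfalse
    rw [cewrSearchLoop]
    by_cases h : lo < hi
    · rw [if_pos h]
      set mid := (lo + hi) / 2 with hmid
      have hmlo : lo ≤ mid := by omega
      have hmhi : mid < hi := by omega
      have hmlen : mid < row.length := by omega
      by_cases hb : (if strict then row.getD mid 0 < level else row.getD mid 0 ≤ level)
      · rw [if_pos hb]
        have hpm : p (row.getD mid 0) = true := by
          rw [hp]; cases strict <;> simpa using hb
        exact ih (mid + 1) hi (by omega) (by omega) hhi
          (fun i hi' => hmono i mid (by omega) hmlen hpm) hfalse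
      · rw [if_neg hb]
        have hpm : p (row.getD mid 0) = false := by
          rw [hp]; cases strict <;> simpa using hb
        refine ih lo mid (by omega) (by omega) (by omega) htrue ?_
        intro i h1 h2
        by_contra hc
        have : p (row.getD mid 0) = true :=
          hmono mid i h1 h2 (by revert hc; cases p (row.getD i 0) <;> simp)
        rw [this] at hpm; exact absurd hpm (by simp)
    · rw [if_neg h]
      have hlh2 : lo = hi := by omega
      exact (cewr_countP_split p row lo (by omega) htrue
        (fun i h1 h2 => hfalse i (by omega) h2)).symm

-- countP(≤ level) splits into countP(< level) + countP(= level); total is the length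
theorem cewr_counts_arith (level : Int) (row : List Int) :
    row.countP (fun v => decide (v ≤ level))
      = row.countP (fun v => decide (v < level)) + row.countP (fun v => decide (v = level))
    ∧ row.countP (fun v => decide (v < level)) + row.countP (fun v => decide (v = level))
      + row.countP (fun v => decide (level < v)) = row.length := by
  induction row with
  | nil => simp
  | cons v rest ih =>
    simp only [List.countP_cons, List.length_cons]
    rcases lt_trichotomy v level with h | h | h
    · have h1 : ¬ v = level := ne_of_lt h
      have h2 : ¬ level < v := not_lt.mpr (le_of_lt h)
      have h3 : v ≤ level := le_of_lt h
      simp [h, h1, h2, h3]; omega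
    · simp [h]; omega
    · have h1 : ¬ v < level := not_lt.mpr (le_of_lt h)
      have h2 : ¬ v = level := (ne_of_lt h).symm
      have h3 : ¬ v ≤ level := not_le.mpr h
      simp [h, h1, h2, h3]; omega

-- the sorted row is weakly increasing position-wise (getD form)
theorem cewr_sorted_getD_mono (xs : List Int) :
    ∀ i j, i ≤ j → j < (PySem.List.sorted xs (fun v => v) false).length →
      (PySem.List.sorted xs (fun v => v) false).getD i 0
        ≤ (PySem.List.sorted xs (fun v => v) false).getD j 0 := by
  intro i j hij hj
  have hpw := PySem.List.sorted_pairwise xs (fun v => v)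
  rw [List.pairwise_iff_getElem] at hpw
  rcases Nat.lt_or_ge i j with h | h
  · have hi : i < (PySem.List.sorted xs (fun v => v) false).length := by omega
    have := hpw i j hi hj h
    simpa [List.getElem?_eq_getElem hi, List.getElem?_eq_getElem hj] using this
  · have : i = j := by omega
    subst this; rfl

-- ===== VERDICT (by name: the statement is the Claim_ definition above) =====
theorem compare_elevations_within_row_spec : Claim_equal_compare_elevations_within_row := by
  intro em mr lvl _hdom _hpre
  unfold Spec_compare_elevations_within_row compare_elevations_within_row compare_elevations_within_row_alt
  set row := PySem.List.pyGetD em mr ([] : List Int) with hrow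
  set srow := PySem.List.sorted row (fun v => v) false with hsrow
  simp only []
  rw [PySem.List.foldl_pyRange_zero_pyGetD' row 0
        (fun (s : Int × Int × Int) (v : Int) =>
          if v < lvl then (s.1 + 1, s.2.1, s.2.2)
          else if v = lvl then (s.1, s.2.1 + 1, s.2.2)
          else if v > lvl then (s.1, s.2.1, s.2.2 + 1)
          else s) ((0 : Int), (0 : Int), (0 : Int))]
  rw [cewr_fold_counts]
  have hperm : srow.Perm row := PySem.List.sorted_perm row (fun v => v) false
  have hmono := cewr_sorted_getD_mono row
  have hlo : cewrSearch srow lvl true = srow.countP (fun v => decide (v < lvl)) := by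
    unfold cewrSearch
    refine cewrSearchLoop_spec srow lvl true (fun v => decide (v < lvl)) (fun v => rfl) ?_ srow.length 0 srow.length
      (by omega)
      (Nat.zero_le _) le_rfl (by omega) (by omega)
    intro i j hij hj hpj
    simp only [decide_eq_true_eq] at hpj ⊢
    exact lt_of_le_of_lt (hmono i j hij hj) hpj
  have hhi : cewrSearch srow lvl false = srow.countP (fun v => decide (v ≤ lvl)) := by
    unfold cewrSearch
    refine cewrSearchLoop_spec srow lvl false (fun v => decide (v ≤ lvl)) (fun v => rfl) ?_ srow.length 0 srow.length
      (by omega)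
      (Nat.zero_le _) le_rfl (by omega) (by omega)
    intro i j hij hj hpj
    simp only [decide_eq_true_eq] at hpj ⊢
    exact le_trans (hmono i j hij hj) hpj
  rw [hlo, hhi]
  have e1 : srow.countP (fun v => decide (v < lvl)) = row.countP (fun v => decide (v < lvl)) :=
    hperm.countP_eq _
  have e2 : srow.countP (fun v => decide (v ≤ lvl)) = row.countP (fun v => decide (v ≤ lvl)) :=
    hperm.countP_eq _
  have e3 : srow.length = row.length := hperm.length_eq
  obtain ⟨ha1, ha2⟩ := cewr_counts_arith lvl row
  simp only [zero_add, List.cons.injEq, and_true, e1, e2, e3]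
  exact ⟨trivial, by omega, by omega⟩
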